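-- pv_equiv track=rewrite | github.com/nd-cse-34872-su20/cse-34872-su20-examples | lecture04/03_contiguous/contiguous_array.py | find_maximum_contiguous_array
-- ===== SOURCE A (Python) =====
-- def find_maximum_contiguous_array(array):
--     totals     = {0: 0} # Totals -> Index where we first achieved this total
--     cur_total  = 0      # Current total
--     max_length = 0      # Maximum length
--
--     for index, digit in enumerate(array, 1):
--         # Update current total so we move up on 1 and down on 0
--         cur_total += 1 if digit == 1 else -1
--
--         # If we have seen this current total before, then we have found a
--         # balanced sequence.  We can compute the length of this balanced
--         # sequence by taking our index and subtracting the index of the first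
--         # time we saw this sequence.  Otherwise, if this is the first time we
--         # have seen this current total, we simply store the index in our table.
--         if cur_total in totals:
--             max_length = max(max_length, index - totals[cur_total])
--         else:
--             totals[cur_total] = index
--
--     return max_length
-- ===== SOURCE B (Python) =====
-- def find_maximum_contiguous_array(array):
--     # Nested-scan alternative: for each start i, walk forward keeping a running
--     # balance (+1 for 1, -1 otherwise); record the length whenever it hits 0.
--     contrib = [1 if d == 1 else -1 for d in array]
--     best = 0
--     for i in range(len(contrib)):
--         bal = 0
--         for j, x in enumerate(contrib[i:], i):
--             bal += x
--             if bal == 0: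
--                 best = max(best, j + 1 - i)
--     return best
-- ===== Notes on version B (the rewrite author's own statement) =====
-- stated objective: alternative
-- what changed: Replaces A's single pass with a first-occurrence hashmap of running totals by a nested scan: for every start index, walk forward with a running +1/-1 balance and record the window length whenever the balance returns to zero.
import Mathlib
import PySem

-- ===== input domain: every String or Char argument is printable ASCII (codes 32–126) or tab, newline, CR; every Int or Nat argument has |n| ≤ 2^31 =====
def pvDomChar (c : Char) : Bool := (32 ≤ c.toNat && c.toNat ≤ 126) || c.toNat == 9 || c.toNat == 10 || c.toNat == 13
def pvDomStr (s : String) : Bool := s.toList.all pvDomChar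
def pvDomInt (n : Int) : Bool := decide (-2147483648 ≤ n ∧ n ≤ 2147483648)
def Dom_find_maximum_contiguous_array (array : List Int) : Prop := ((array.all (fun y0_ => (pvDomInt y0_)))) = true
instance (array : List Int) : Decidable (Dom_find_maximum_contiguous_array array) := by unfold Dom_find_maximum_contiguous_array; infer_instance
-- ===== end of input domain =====

-- B replaces A's single-pass first-occurrence hashmap by a nested scan over all start
-- indices with a running balance (objective: alternative decomposition, not faster).

-- ===== PORT A =====
-- the loop over enumerate(array, 1): m counts elements already processed (index = m + 1)
def find_maximum_contiguous_array_go : List Int → Nat → PySem.Dict Int Int → Int → Int → Int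
  | [], _, _, _, maxl => maxl
  | d :: rest, m, totals, cur, maxl =>
      let cur' := cur + (if d = 1 then 1 else -1)
      match PySem.Dict.get? totals cur' with
      | some i0 => find_maximum_contiguous_array_go rest (m+1) totals cur' (max maxl ((m : Int) + 1 - i0))
      | none => find_maximum_contiguous_array_go rest (m+1) (PySem.Dict.insert totals cur' ((m : Int) + 1)) cur' maxl

def find_maximum_contiguous_array (array : List Int) : Int :=
  find_maximum_contiguous_array_go array 0 (PySem.Dict.ofList [((0 : Int), (0 : Int))]) 0 0

-- ===== PORT B =====
def pvContrib (array : List Int) : List Int := array.map (fun d => if d = 1 then 1 else -1)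

-- the inner loop 'for j, x in enumerate(contrib[i:], i)'
def pvInner : List Int → Nat → Nat → Int → Int → Int
  | [], _, _, _, best => best
  | x :: xs, i, j, bal, best =>
      let bal' := bal + x
      pvInner xs i (j+1) bal' (if bal' = 0 then max best ((j : Int) + 1 - (i : Int)) else best)

def find_maximum_contiguous_array_alt (array : List Int) : Int :=
  let c := pvContrib array
  (List.range c.length).foldl (fun best i => pvInner (c.drop i) i i 0 best) 0

-- ===== PRECONDITION & SPEC =====
def Spec_find_maximum_contiguous_array (array : List Int) (out : Int) : Prop := out = find_maximum_contiguous_array_alt array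
instance (array : List Int) (out : Int) : Decidable (Spec_find_maximum_contiguous_array array out) := by unfold Spec_find_maximum_contiguous_array; infer_instance

-- ===== CLAIM (what is proved, stated in full; the proofs are below) =====
def Claim_equal_find_maximum_contiguous_array : Prop := ∀ (array : List Int), Dom_find_maximum_contiguous_array array → Spec_find_maximum_contiguous_array array (find_maximum_contiguous_array array)

-- ===== LEMMAS AND PROOFS =====

-- prefix balance of the first k contributions
def pvPsum (c : List Int) (k : Nat) : Int := (c.take k).sum

-- least index whose prefix balance equals that of index k (exists: k itself)
def pvFirst (c : List Int) (k : Nat) : Nat :=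
  Nat.find (p := fun i => pvPsum c i = pvPsum c k) ⟨k, rfl⟩

-- A's running maximum after m elements
def pvBest (c : List Int) (m : Nat) : Nat :=
  (Finset.range (m+1)).sup (fun k => k - pvFirst c k)

-- B's candidate maximum for start index i
def pvCand (c : List Int) (i : Nat) : Nat :=
  (Finset.Ioc i c.length).sup (fun k => if pvPsum c k = pvPsum c i then k - i else 0)

lemma pvPsum_succ (c : List Int) (k : Nat) (h : k < c.length) :
    pvPsum c (k+1) = pvPsum c k + c.get ⟨k, h⟩ := by
  unfold pvPsum
  rw [List.take_add_one, List.sum_append]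
  simp [List.getElem?_eq_getElem h]

lemma pvFirst_spec (c : List Int) (k : Nat) : pvPsum c (pvFirst c k) = pvPsum c k :=
  Nat.find_spec (p := fun i => pvPsum c i = pvPsum c k) ⟨k, rfl⟩

lemma pvFirst_min (c : List Int) (k i : Nat) (h : pvPsum c i = pvPsum c k) : pvFirst c k ≤ i :=
  Nat.find_min' _ h

-- the exact first-occurrence characterisation pins pvFirst down
lemma pvFirst_eq (c : List Int) (k iN : Nat) (hP : pvPsum c iN = pvPsum c k)
    (hmin : ∀ i' < iN, pvPsum c i' ≠ pvPsum c k) : pvFirst c k = iN := by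
  have h1 := pvFirst_min c k iN hP
  rcases Nat.lt_or_ge (pvFirst c k) iN with h | h
  · exact absurd (pvFirst_spec c k) (hmin _ h)
  · omega

lemma pvBest_succ (c : List Int) (m : Nat) :
    pvBest c (m+1) = max ((m+1) - pvFirst c (m+1)) (pvBest c m) := by
  unfold pvBest
  rw [Finset.range_add_one, Finset.sup_insert]

-- A's loop invariant
lemma goA_spec : ∀ (fuel : Nat) (array : List Int) (m : Nat) (totals : PySem.Dict Int Int)
    (cur maxl : Int),
    array.length - m = fuel → m ≤ array.length →
    cur = pvPsum (pvContrib array) m →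
    (∀ v i0, totals.get? v = some i0 → ∃ iN : Nat, i0 = (iN : Int) ∧ iN ≤ m ∧
        pvPsum (pvContrib array) iN = v ∧ ∀ i' < iN, pvPsum (pvContrib array) i' ≠ v) →
    (∀ v, totals.get? v = none → ∀ i ≤ m, pvPsum (pvContrib array) i ≠ v) →
    maxl = (pvBest (pvContrib array) m : Int) →
    find_maximum_contiguous_array_go (array.drop m) m totals cur maxl
      = (pvBest (pvContrib array) array.length : Int) := by
  intro fuel
  induction fuel with
  | zero =>
    intro array m totals cur maxl hfuel hm hcur _ _ hmax
    have hm' : m = array.length := by omega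
    subst hm' hmax
    rw [List.drop_eq_nil_of_le (le_refl _)]
    rfl
  | succ fuel ih =>
    intro array m totals cur maxl hfuel hm hcur hsome hnone hmax
    set c := pvContrib array with hc
    have hlen : c.length = array.length := by simp [hc, pvContrib]
    have hmlt : m < array.length := by omega
    have hmc : m < c.length := by omega
    -- expose one step of the loop
    rw [← List.getElem_cons_drop hmlt]
    have hcm : c.get ⟨m, hmc⟩ = if array.get ⟨m, hmlt⟩ = 1 then 1 else -1 := by
      simp [hc, pvContrib]
    have hcur' : cur + (if array.get ⟨m, hmlt⟩ = 1 then 1 else -1) = pvPsum c (m+1) := by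
      rw [pvPsum_succ c m hmc, hcm, hcur]
    show find_maximum_contiguous_array_go (array.get ⟨m, hmlt⟩ :: array.drop (m+1)) m totals cur maxl
        = (pvBest c array.length : Int)
    unfold find_maximum_contiguous_array_go
    simp only []
    rw [hcur']
    cases hget : PySem.Dict.get? totals (pvPsum c (m+1)) with
    | some i0 =>
      obtain ⟨iN, hi0, hiNle, hiNP, hiNmin⟩ := hsome _ _ hget
      have hfst : pvFirst c (m+1) = iN := pvFirst_eq c (m+1) iN hiNP hiNmin
      apply ih array (m+1) totals (pvPsum c (m+1)) _ (by omega) (by omega) rfl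
      · intro v j0 hg
        obtain ⟨jN, h1, h2, h3, h4⟩ := hsome _ _ hg
        exact ⟨jN, h1, by omega, h3, h4⟩
      · intro v hg i hi
        rcases Nat.lt_or_ge i (m+1) with h | h
        · exact hnone _ hg i (by omega)
        · have : i = m + 1 := by omega
          subst this
          intro hPv
          rw [← hPv] at hg
          rw [hg] at hget
          simp at hget
      · rw [hmax, hi0, ← hc, pvBest_succ, hfst]
        omega
    | none =>
      have hfst : pvFirst c (m+1) = m+1 := by
        apply pvFirst_eq c (m+1) (m+1) rfl
        intro i' hi' hP
        exact hnone _ hget i' (by omega) hP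
      apply ih array (m+1) _ (pvPsum c (m+1)) _ (by omega) (by omega) rfl
      · intro v i0 hg
        rw [PySem.Dict.get?_insert] at hg
        by_cases hv : v = pvPsum c (m+1)
        · subst hv
          simp at hg
          refine ⟨m+1, by omega, le_refl _, rfl, ?_⟩
          intro i' hi'
          exact hnone _ hget i' (by omega)
        · rw [if_neg hv] at hg
          obtain ⟨jN, h1, h2, h3, h4⟩ := hsome _ _ hg
          exact ⟨jN, h1, by omega, h3, h4⟩
      · intro v hg i hi
        rw [PySem.Dict.get?_insert] at hg
        by_cases hv : v = pvPsum c (m+1)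
        · rw [if_pos hv] at hg
          simp at hg
        · rw [if_neg hv] at hg
          rcases Nat.lt_or_ge i (m+1) with h | h
          · exact hnone _ hg i (by omega)
          · have : i = m + 1 := by omega
            subst this
            intro hPv
            exact hv hPv.symm
      · rw [hmax, ← hc, pvBest_succ, hfst]
        omega

lemma A_eq (array : List Int) :
    find_maximum_contiguous_array array = (pvBest (pvContrib array) array.length : Int) := by
  unfold find_maximum_contiguous_array
  have hofl : PySem.Dict.ofList [((0:Int),(0:Int))] = PySem.Dict.insert PySem.Dict.empty 0 0 := by
    decide
  have h0 : ∀ v : Int, (PySem.Dict.ofList [((0 : Int), (0 : Int))]).get? v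
      = if v = 0 then some 0 else none := by
    intro v
    rw [hofl, PySem.Dict.get?_insert, PySem.Dict.get?_empty]
  have := goA_spec array.length array 0 (PySem.Dict.ofList [((0 : Int), (0 : Int))]) 0 0
    (by omega) (by omega) rfl ?_ ?_ ?_
  · simpa using this
  · intro v i0 hg
    rw [h0] at hg
    by_cases hv : v = 0
    · subst hv
      simp at hg
      exact ⟨0, by omega, le_refl _, rfl, by omega⟩
    · rw [if_neg hv] at hg; simp at hg
  · intro v hg i hi
    have : i = 0 := by omega
    subst this
    rw [h0] at hg
    by_cases hv : v = 0
    · rw [if_pos hv] at hg; simp at hg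
    · intro hP
      exact hv (by simpa [pvPsum] using hP.symm)
  · simp [pvBest]

-- B's inner loop
lemma pvInner_spec : ∀ (fuel : Nat) (c : List Int) (i j : Nat) (best : Int),
    c.length - j = fuel → i ≤ j → 0 ≤ best →
    pvInner (c.drop j) i j (pvPsum c j - pvPsum c i) best
      = max best (((Finset.Ioc j c.length).sup
          (fun k => if pvPsum c k = pvPsum c i then k - i else 0) : Nat) : Int) := by
  intro fuel
  induction fuel with
  | zero =>
    intro c i j best hfuel hij hb
    have hj : c.length ≤ j := by omega
    rw [List.drop_eq_nil_of_le hj, Finset.Ioc_eq_empty (by omega)]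
    simp [pvInner]
    omega
  | succ fuel ih =>
    intro c i j best hfuel hij hb
    have hj : j < c.length := by omega
    rw [← List.getElem_cons_drop hj]
    show pvInner (c.get ⟨j, hj⟩ :: c.drop (j+1)) i j (pvPsum c j - pvPsum c i) best = _
    unfold pvInner
    simp only []
    have hbal : pvPsum c j - pvPsum c i + c.get ⟨j, hj⟩ = pvPsum c (j+1) - pvPsum c i := by
      rw [pvPsum_succ c j hj]; ring
    rw [hbal]
    have hIoc : Finset.Ioc j c.length = insert (j+1) (Finset.Ioc (j+1) c.length) := by
      ext x; simp; omega
    rw [hIoc, Finset.sup_insert]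
    set best' := if pvPsum c (j+1) - pvPsum c i = 0 then max best ((j : Int) + 1 - (i : Int)) else best with hbest'
    have hb' : 0 ≤ best' := by
      rw [hbest']; split
      · exact le_trans hb (le_max_left _ _)
      · exact hb
    rw [ih c i (j+1) best' (by omega) (by omega) hb']
    by_cases heq : pvPsum c (j+1) = pvPsum c i
    · rw [hbest']
      rw [if_pos (by omega), if_pos heq]
      have : ((j:Int) + 1 - (i:Int)) = ((j + 1 - i : Nat) : Int) := by omega
      omega
    · rw [hbest', if_neg (by intro h; exact heq (by omega)), if_neg heq]
      omega

-- B's outer loop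
lemma pvOuter_spec (c : List Int) : ∀ (m : Nat) (best : Int), 0 ≤ best →
    (List.range m).foldl (fun best i => pvInner (c.drop i) i i 0 best) best
      = max best (((Finset.range m).sup (fun i => pvCand c i) : Nat) : Int) := by
  intro m
  induction m with
  | zero =>
    intro best hb
    simp
    omega
  | succ m ih =>
    intro best hb
    rw [List.range_succ, List.foldl_append]
    simp only [List.foldl_cons, List.foldl_nil]
    rw [ih best hb]
    have hz : (0 : Int) = pvPsum c m - pvPsum c m := by ring
    have hb2 : 0 ≤ max best (((Finset.range m).sup (fun i => pvCand c i) : Nat) : Int) := by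
      have : (0:Int) ≤ (((Finset.range m).sup (fun i => pvCand c i) : Nat) : Int) := Int.natCast_nonneg _
      omega
    rw [hz, pvInner_spec (c.length - m) c m m _ rfl (le_refl _) hb2]
    rw [Finset.range_add_one, Finset.sup_insert]
    show _ = max best ((((pvCand c m) ⊔ (Finset.range m).sup (fun i => pvCand c i) : Nat)) : Int)
    unfold pvCand
    omega

lemma B_eq (array : List Int) :
    find_maximum_contiguous_array_alt array
      = (((Finset.range (pvContrib array).length).sup (fun i => pvCand (pvContrib array) i) : Nat) : Int) := by
  unfold find_maximum_contiguous_array_alt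
  simp only []
  rw [pvOuter_spec (pvContrib array) (pvContrib array).length 0 (le_refl _)]
  omega

-- the two maxima agree
lemma sup_eq_lemma (c : List Int) :
    pvBest c c.length = (Finset.range c.length).sup (fun i => pvCand c i) := by
  apply le_antisymm
  · apply Finset.sup_le
    intro k hk
    rw [Finset.mem_range] at hk
    rcases Nat.lt_or_ge (pvFirst c k) k with h | h
    · have hk' : k ≤ c.length := by omega
      have hi0 : pvFirst c k < c.length := by omega
      have hmem : k ∈ Finset.Ioc (pvFirst c k) c.length := by
        rw [Finset.mem_Ioc]; omega
      calc k - pvFirst c k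
          = (if pvPsum c k = pvPsum c (pvFirst c k) then k - pvFirst c k else 0) := by
            rw [if_pos (pvFirst_spec c k).symm]
        _ ≤ pvCand c (pvFirst c k) := by
            unfold pvCand
            exact Finset.le_sup (f := fun k' => if pvPsum c k' = pvPsum c (pvFirst c k) then k' - pvFirst c k else 0) hmem
        _ ≤ (Finset.range c.length).sup (fun i => pvCand c i) :=
            Finset.le_sup (Finset.mem_range.mpr hi0)
    · have : k - pvFirst c k = 0 := by omega
      rw [this]
      exact Nat.zero_le _
  · apply Finset.sup_le
    intro i hi
    rw [Finset.mem_range] at hi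
    apply Finset.sup_le
    intro k hk
    rw [Finset.mem_Ioc] at hk
    split
    · next heq =>
      have h1 : pvFirst c k ≤ i := pvFirst_min c k i heq.symm
      calc k - i ≤ k - pvFirst c k := by omega
        _ ≤ pvBest c c.length := by
            unfold pvBest
            exact Finset.le_sup (f := fun k => k - pvFirst c k) (Finset.mem_range.mpr (by omega))
    · exact Nat.zero_le _

-- ===== VERDICT (by name: the statement is the Claim_ definition above) =====
theorem find_maximum_contiguous_array_spec : Claim_equal_find_maximum_contiguous_array := by
  intro array _
  unfold Spec_find_maximum_contiguous_array
  rw [A_eq, B_eq, ← sup_eq_lemma]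
  have hlen : (pvContrib array).length = array.length := by simp [pvContrib]
  rw [hlen]
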